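-- pv_equiv track=rewrite | github.com/ProofFrog/ProofFrog | proof_frog/suggestions.py | suggest_identifier
-- ===== SOURCE A (Python) =====
-- from collections.abc import Iterable
--
-- def levenshtein_distance(s1: str, s2: str) -> int:
--     """Compute the Levenshtein edit distance between two strings."""
--     if len(s1) < len(s2):
--         return levenshtein_distance(s2, s1)  # pylint: disable=arguments-out-of-order
--     if len(s2) == 0:
--         return len(s1)
--     prev_row = list(range(len(s2) + 1))
--     for i, c1 in enumerate(s1):
--         curr_row = [i + 1]
--         for j, c2 in enumerate(s2):
--             cost = 0 if c1 == c2 else 1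
--             curr_row.append(
--                 min(prev_row[j + 1] + 1, curr_row[j] + 1, prev_row[j] + cost)
--             )
--         prev_row = curr_row
--     return prev_row[-1]
--
-- def suggest_identifier(
--     name: str, candidates: Iterable[str], max_distance: int = 2
-- ) -> str | None:
--     """Return the closest match to *name* from *candidates*, or None."""
--     if len(name) < 3:
--         return None
--     best: str | None = None
--     best_dist = max_distance + 1
--     for candidate in candidates:
--         if candidate == name:
--             continue
--         if abs(len(candidate) - len(name)) > max_distance:
--             continue
--         dist = levenshtein_distance(name, candidate)
--         if dist < best_dist:
--             best, best_dist = candidate, dist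
--     return best
-- ===== SOURCE B (Python) =====
-- def _lev(a: str, b: str) -> int:
--     # anti-diagonal (wavefront) edit distance: sweep diagonals s = i + j of the
--     # DP grid, keeping only the previous two diagonals
--     la, lb = len(a), len(b)
--     prev2, prev = [], [0]
--     for s in range(1, la + lb + 1):
--         lo, hi = max(0, s - lb), min(s, la)
--         lo1, lo2 = max(0, s - 1 - lb), max(0, s - 2 - lb)
--         cur = []
--         for i in range(lo, hi + 1):
--             j = s - i
--             if i == 0:
--                 cur.append(j)
--             elif j == 0:
--                 cur.append(i)
--             else:
--                 cost = 0 if a[i - 1] == b[j - 1] else 1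
--                 cur.append(min(prev[i - lo1] + 1,
--                                prev[i - 1 - lo1] + 1,
--                                prev2[i - 1 - lo2] + cost))
--         prev2, prev = prev, cur
--     return prev[-1]
--
-- def suggest_identifier(name, candidates, max_distance=2):
--     if len(name) < 3:
--         return None
--     best = None
--     bound = max_distance  # shrinks to (best distance found) - 1
--     for c in candidates:
--         if c == name or abs(len(c) - len(name)) > bound:
--             continue
--         d = _lev(name, c)
--         if d <= bound:
--             best, bound = c, d - 1
--     return best
-- ===== Notes on version B (the rewrite author's own statement) =====
-- stated objective: alternative
-- what changed: B computes the edit distance by an anti-diagonal wavefront sweep (two previous diagonals, no argument swap) instead of A's row-by-row DP with a recursive swap, and selects the winner with a shrinking threshold (bound becomes best-distance-minus-one) so later candidates are rejected by the length test alone instead of A's fixed-threshold running-best comparison.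
import Mathlib
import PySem

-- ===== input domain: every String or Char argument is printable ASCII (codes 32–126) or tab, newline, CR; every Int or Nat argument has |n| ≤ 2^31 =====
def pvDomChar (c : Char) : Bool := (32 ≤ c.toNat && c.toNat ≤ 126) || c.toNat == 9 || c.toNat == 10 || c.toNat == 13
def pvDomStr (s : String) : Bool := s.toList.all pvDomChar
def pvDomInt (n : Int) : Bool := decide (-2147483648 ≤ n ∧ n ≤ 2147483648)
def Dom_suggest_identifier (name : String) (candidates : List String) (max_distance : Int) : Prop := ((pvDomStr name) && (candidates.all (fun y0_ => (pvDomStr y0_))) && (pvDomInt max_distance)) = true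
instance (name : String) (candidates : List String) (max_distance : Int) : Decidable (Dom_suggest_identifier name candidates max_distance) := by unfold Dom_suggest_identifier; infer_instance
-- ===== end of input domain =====

-- B replaces A's row-by-row DP (with recursive argument swap) by an anti-diagonal wavefront
-- edit distance, and A's fixed-threshold running-best selection by a shrinking-threshold scan
-- that skips later candidates by length alone (objective: alternative).

-- ===== PORT A =====
-- inner loop of levenshtein_distance: one DP row extension step
def pvStepA (c1 : Char) (prev_row curr : List Int) (jc : Int × Char) : List Int :=
  let cost : Int := if c1 = jc.2 then 0 else 1
  curr ++ [min (PySem.List.pyGetD prev_row (jc.1 + 1) 0 + 1)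
            (min (PySem.List.pyGetD curr jc.1 0 + 1)
                 (PySem.List.pyGetD prev_row jc.1 0 + cost))]

-- body of the outer 'for i, c1 in enumerate(s1)' loop: builds curr_row from prev_row
def pvInnerA (c1 : Char) (prev_row : List Int) (s2 : List Char) (i : Int) : List Int :=
  (PySem.List.enumerate s2).foldl (pvStepA c1 prev_row) [i + 1]

-- levenshtein_distance after the (at most one) swapping recursive call
def pvLevGo (s1 s2 : List Char) : Int :=
  if s2.length = 0 then (s1.length : Int)
  else
    let last := (PySem.List.enumerate s1).foldl
      (fun prev_row ic => pvInnerA ic.2 prev_row s2 ic.1)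
      (PySem.List.pyRange 0 ((s2.length : Int) + 1) 1)
    PySem.List.pyGetD last (-1) 0   -- prev_row[-1]; the row is never empty

-- 'if len(s1) < len(s2): return levenshtein_distance(s2, s1)' recurses exactly once, as this if
def pvLevenshtein (s1 s2 : String) : Int :=
  if s1.toList.length < s2.toList.length then pvLevGo s2.toList s1.toList
  else pvLevGo s1.toList s2.toList

-- body of A's 'for candidate in candidates' loop; state = (best, best_dist)
def pvSelStep (name : String) (max_distance : Int) (st : Option String × Int) (candidate : String) :
    Option String × Int :=
  if candidate = name then st
  else if max_distance < |(candidate.toList.length : Int) - (name.toList.length : Int)| then st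
  else
    let dist := pvLevenshtein name candidate
    if dist < st.2 then (some candidate, dist) else st

def suggest_identifier (name : String) (candidates : List String) (max_distance : Int) : Option String :=
  if (name.toList.length : Int) < 3 then none
  else (candidates.foldl (pvSelStep name max_distance) (none, max_distance + 1)).1

-- ===== PORT B =====
-- body of B's inner 'for i in range(lo, hi + 1)' loop: appends cell (i, s-i) of diagonal s
def pvCellStep (ach bch : List Char) (prev2 prev : List Int) (s lo1 lo2 : Int)
    (cur : List Int) (i : Int) : List Int :=
  let j := s - i
  if i = 0 then cur ++ [j]
  else if j = 0 then cur ++ [i]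
  else
    let cost : Int := if PySem.List.pyGetD ach (i - 1) ' ' = PySem.List.pyGetD bch (j - 1) ' '
      then 0 else 1
    cur ++ [min (PySem.List.pyGetD prev (i - lo1) 0 + 1)
             (min (PySem.List.pyGetD prev (i - 1 - lo1) 0 + 1)
                  (PySem.List.pyGetD prev2 (i - 1 - lo2) 0 + cost))]

-- body of B's outer 'for s in range(1, la + lb + 1)' loop: state = (prev2, prev)
def pvDiagStep (ach bch : List Char) (la lb : Int) (st : List Int × List Int) (s : Int) :
    List Int × List Int :=
  let lo := max 0 (s - lb)
  let hi := min s la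
  let lo1 := max 0 (s - 1 - lb)
  let lo2 := max 0 (s - 2 - lb)
  (st.2, (PySem.List.pyRange lo (hi + 1) 1).foldl (pvCellStep ach bch st.1 st.2 s lo1 lo2) [])

def pvLevAlt (ach bch : List Char) : Int :=
  let la : Int := ach.length
  let lb : Int := bch.length
  let fin := (PySem.List.pyRange 1 (la + lb + 1) 1).foldl (pvDiagStep ach bch la lb) ([], [0])
  PySem.List.pyGetD fin.2 (-1) 0   -- prev[-1]; the final diagonal is never empty

-- body of B's 'for c in candidates' loop; state = (best, bound)
def pvSelStepB (name : String) (st : Option String × Int) (c : String) : Option String × Int :=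
  if c = name ∨ st.2 < |(c.toList.length : Int) - (name.toList.length : Int)| then st
  else
    let d := pvLevAlt name.toList c.toList
    if d ≤ st.2 then (some c, d - 1) else st

def suggest_identifier_alt (name : String) (candidates : List String) (max_distance : Int) :
    Option String :=
  if (name.toList.length : Int) < 3 then none
  else (candidates.foldl (pvSelStepB name) (none, max_distance)).1

-- ===== PRECONDITION & SPEC =====
def Spec_suggest_identifier (name : String) (candidates : List String) (max_distance : Int) (out : Option String) : Prop := out = suggest_identifier_alt name candidates max_distance
instance (name : String) (candidates : List String) (max_distance : Int) (out : Option String) : Decidable (Spec_suggest_identifier name candidates max_distance out) := by unfold Spec_suggest_identifier; infer_instance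

-- ===== CLAIM (what is proved, stated in full; the proofs are below) =====
def Claim_equal_suggest_identifier : Prop := ∀ (name : String) (candidates : List String) (max_distance : Int), Dom_suggest_identifier name candidates max_distance → Spec_suggest_identifier name candidates max_distance (suggest_identifier name candidates max_distance)

-- ===== LEMMAS AND PROOFS =====

-- Reference edit distance, head recursion
def myLev : List Char → List Char → Nat
  | [], t => t.length
  | _ :: s, [] => s.length + 1
  | a :: s, b :: t =>
      min (myLev s (b :: t) + 1)
        (min (myLev (a :: s) t + 1) (myLev s t + (if a = b then 0 else 1)))
termination_by s t => s.length + t.length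

lemma myLev_nil_left (t : List Char) : myLev [] t = t.length := by simp [myLev]

lemma myLev_nil_right (s : List Char) : myLev s [] = s.length := by
  cases s <;> simp [myLev]

lemma myLev_cons_cons (a b : Char) (s t : List Char) :
    myLev (a :: s) (b :: t) =
      min (myLev s (b :: t) + 1)
        (min (myLev (a :: s) t + 1) (myLev s t + (if a = b then 0 else 1))) := by
  rw [myLev]

lemma myLev_comm (s : List Char) : ∀ t, myLev s t = myLev t s := by
  induction s with
  | nil => intro t; rw [myLev_nil_left, myLev_nil_right]
  | cons a s ihs =>
    intro t
    induction t with
    | nil => rw [myLev_nil_left, myLev_nil_right]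
    | cons b t iht =>
      rw [myLev_cons_cons, myLev_cons_cons, ihs (b :: t), ihs t, iht]
      have hab : (if a = b then 0 else 1) = (if b = a then 0 else 1) := by
        by_cases h : a = b <;> simp [h, Ne.symm]
      rw [hab]
      omega

lemma myLev_len_le (s : List Char) : ∀ t, t.length ≤ myLev s t + s.length := by
  induction s with
  | nil => intro t; rw [myLev_nil_left]; simp
  | cons a s ihs =>
    intro t
    induction t with
    | nil => simp
    | cons b t iht =>
      rw [myLev_cons_cons]
      have h1 := ihs (b :: t)
      have h2 := ihs t
      simp only [List.length_cons] at *
      omega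

-- levE s t = edit distance, formulated so that the snoc-snoc recurrence is definitional
def levE (s t : List Char) : Int := (myLev s.reverse t.reverse : Int)

lemma levE_nil_left (t : List Char) : levE [] t = (t.length : Int) := by
  simp [levE, myLev_nil_left]

lemma levE_nil_right (s : List Char) : levE s [] = (s.length : Int) := by
  simp [levE, myLev_nil_right]

lemma levE_comm (s t : List Char) : levE s t = levE t s := by
  simp [levE, myLev_comm]

lemma levE_snoc_snoc (p q : List Char) (c d : Char) :
    levE (p ++ [c]) (q ++ [d]) =
      min (levE p (q ++ [d]) + 1)
        (min (levE (p ++ [c]) q + 1) (levE p q + (if c = d then 0 else 1))) := by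
  simp only [levE, List.reverse_append, List.reverse_singleton, List.singleton_append,
    myLev_cons_cons]
  push_cast [Nat.cast_min]
  by_cases h : c = d <;> simp [h]

lemma levE_abs_le (s t : List Char) : |(s.length : Int) - (t.length : Int)| ≤ levE s t := by
  have h1 := myLev_len_le s.reverse t.reverse
  have h2 := myLev_len_le t.reverse s.reverse
  rw [myLev_comm] at h2
  simp only [List.length_reverse] at h1 h2
  rw [abs_le]
  unfold levE
  omega

-- ---- A's row DP computes levE ----

def rowA (p t : List Char) : List Int :=
  (List.range (t.length + 1)).map (fun j => levE p (t.take j))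

lemma length_rowA (p t : List Char) : (rowA p t).length = t.length + 1 := by
  simp [rowA]

lemma innerA (c : Char) (p t : List Char) :
    ∀ t₂ t₁, t = t₁ ++ t₂ →
      (PySem.List.enumerate t₂ (t₁.length : Int)).foldl (pvStepA c (rowA p t))
        ((List.range (t₁.length + 1)).map (fun j => levE (p ++ [c]) (t.take j)))
      = rowA (p ++ [c]) t := by
  intro t₂
  induction t₂ with
  | nil =>
    intro t₁ h
    simp only [List.append_nil] at h
    subst h
    rfl
  | cons d t₂ ih =>
    intro t₁ h
    have hlen : t.length = t₁.length + t₂.length + 1 := by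
      subst h; simp only [List.length_append, List.length_cons]; omega
    have htk : t.take t₁.length = t₁ := by
      subst h; rw [List.take_left]
    have htk1 : t.take (t₁.length + 1) = t₁ ++ [d] := by
      subst h
      have he : t₁ ++ d :: t₂ = (t₁ ++ [d]) ++ t₂ := by simp
      have hl : t₁.length + 1 = (t₁ ++ [d]).length := by simp
      rw [he, hl, List.take_left]
    rw [PySem.List.enumerate_cons, List.foldl_cons]
    have hstep : pvStepA c (rowA p t)
        ((List.range (t₁.length + 1)).map (fun j => levE (p ++ [c]) (t.take j)))
        ((t₁.length : Int), d)
        = (List.range (t₁.length + 1 + 1)).map (fun j => levE (p ++ [c]) (t.take j)) := by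
      unfold pvStepA rowA
      rw [show ((t₁.length : Int) + 1) = (((t₁.length + 1 : Nat)) : Int) by push_cast; ring]
      rw [PySem.List.pyGetD_natCast, PySem.List.pyGetD_natCast, PySem.List.pyGetD_natCast]
      rw [PySem.List.getD_map_range _ _ _ _ (by omega),
          PySem.List.getD_map_range _ _ _ _ (by omega),
          PySem.List.getD_map_range _ _ _ _ (by omega)]
      dsimp only
      rw [htk, htk1, ← levE_snoc_snoc]
      rw [show List.range (t₁.length + 1 + 1) = List.range (t₁.length + 1) ++ [t₁.length + 1] from
        List.range_succ, List.map_append]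
      simp [htk1]
    rw [hstep]
    have hrec := ih (t₁ ++ [d]) (by simp [h])
    simp only [List.length_append, List.length_cons, List.length_nil] at hrec
    rw [show ((t₁.length + (0 + 1) : Nat) : Int) = (t₁.length : Int) + 1 by push_cast; ring] at hrec
    simpa using hrec

lemma outerA (t : List Char) :
    ∀ s₂ s₁,
      (PySem.List.enumerate s₂ (s₁.length : Int)).foldl
        (fun prev_row ic => pvInnerA ic.2 prev_row t ic.1) (rowA s₁ t)
      = rowA (s₁ ++ s₂) t := by
  intro s₂
  induction s₂ with
  | nil => intro s₁; simp only [List.append_nil]; rfl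
  | cons c s₂ ih =>
    intro s₁
    rw [PySem.List.enumerate_cons, List.foldl_cons]
    have hstep : pvInnerA c (rowA s₁ t) t (s₁.length : Int) = rowA (s₁ ++ [c]) t := by
      unfold pvInnerA
      have hinit : [(s₁.length : Int) + 1]
          = (List.range (List.length ([] : List Char) + 1)).map
              (fun j => levE (s₁ ++ [c]) (t.take j)) := by
        simp [levE_nil_right]
      rw [hinit]
      have := innerA c s₁ t t [] rfl
      simpa using this
    rw [hstep]
    have hrec := ih (s₁ ++ [c])
    simp only [List.length_append, List.length_cons, List.length_nil] at hrec
    rw [show ((s₁.length + (0 + 1) : Nat) : Int) = (s₁.length : Int) + 1 by push_cast; ring] at hrec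
    simpa using hrec

lemma levGo_eq (s1 s2 : List Char) : pvLevGo s1 s2 = levE s1 s2 := by
  unfold pvLevGo
  split
  · next h =>
    have h0 : s2 = [] := List.length_eq_zero_iff.mp h
    subst h0
    rw [levE_nil_right]
  · next h =>
    dsimp only
    have h0 : PySem.List.pyRange 0 ((s2.length : Int) + 1) 1 = rowA [] s2 := by
      rw [PySem.List.pyRange_one]
      unfold rowA
      rw [show (((s2.length : Int) + 1) - 0).toNat = s2.length + 1 by omega]
      apply List.map_congr_left
      intro j hj
      simp only [List.mem_range] at hj
      rw [levE_nil_left]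
      simp [List.length_take]
      omega
    rw [h0]
    have houter := outerA s2 s1 []
    simp only [List.length_nil, Nat.cast_zero, List.nil_append] at houter
    rw [houter]
    have hne : rowA s1 s2 ≠ [] := by
      apply List.ne_nil_of_length_pos
      rw [length_rowA]; omega
    rw [PySem.List.pyGetD_neg_one _ _ hne]
    rw [List.getLast_eq_getElem]
    simp [rowA]

lemma lev_eq (s1 s2 : String) : pvLevenshtein s1 s2 = levE s1.toList s2.toList := by
  unfold pvLevenshtein
  split
  · rw [levGo_eq, levE_comm]
  · rw [levGo_eq]

-- ---- B's anti-diagonal wavefront computes levE ----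

-- first grid row index on diagonal s (Nat subtraction = max(0, s - |b|))
def dlo (b : List Char) (s : Nat) : Nat := s - b.length

-- cell t of diagonal s: the edit distance of the prefixes meeting that grid point
def dcell (a b : List Char) (s t : Nat) : Int :=
  levE (a.take (dlo b s + t)) (b.take (s - (dlo b s + t)))

def ddiag (a b : List Char) (s : Nat) : List Int :=
  (List.range (min s a.length + 1 - dlo b s)).map (dcell a b s)

lemma ddiag_zero (a b : List Char) : ddiag a b 0 = [0] := by
  simp [ddiag, dlo, dcell, List.range_succ, levE_nil_left]

lemma cellStep_eq (a b : List Char) (s : Nat) (hs1 : 1 ≤ s) (hs : s ≤ a.length + b.length)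
    (prev2 : List Int) (hp2 : 2 ≤ s → prev2 = ddiag a b (s - 2))
    (k : Nat) (hk : k < min s a.length + 1 - dlo b s) :
    pvCellStep a b prev2 (ddiag a b (s - 1)) (s : Int)
        (max 0 ((s : Int) - 1 - (b.length : Int))) (max 0 ((s : Int) - 2 - (b.length : Int)))
        ((List.range k).map (dcell a b s)) ((dlo b s + k : Nat) : Int)
      = (List.range (k + 1)).map (dcell a b s) := by
  have hk' : k < min s a.length + 1 - (s - b.length) := by simpa [dlo] using hk
  unfold pvCellStep
  dsimp only
  rw [List.range_succ, List.map_append, List.map_singleton]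
  by_cases hi0 : dlo b s + k = 0
  · obtain ⟨hlo0, hk0⟩ : dlo b s = 0 ∧ k = 0 := by omega
    subst hk0
    simp only [hlo0, Nat.add_zero, Nat.cast_zero, sub_zero, if_true]
    have hval : dcell a b s 0 = (s : Int) := by
      unfold dcell
      rw [hlo0]
      simp only [Nat.add_zero, List.take_zero, Nat.sub_zero, levE_nil_left,
        List.length_take]
      simp only [dlo] at hlo0
      omega
    rw [hval]
  · rw [if_neg (show ¬ ((dlo b s + k : Nat) : Int) = 0 by omega)]
    by_cases hj0 : s - (dlo b s + k) = 0
    · rw [if_pos (show (s : Int) - ((dlo b s + k : Nat) : Int) = 0 by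
        simp only [dlo] at *; omega)]
      have hval : dcell a b s k = ((dlo b s + k : Nat) : Int) := by
        unfold dcell
        rw [hj0]
        simp only [List.take_zero, levE_nil_right, List.length_take]
        simp only [dlo] at *
        omega
      rw [hval]
    · rw [if_neg (show ¬ (s : Int) - ((dlo b s + k : Nat) : Int) = 0 by
        simp only [dlo] at *; omega)]
      -- else branch: both a-index and b-index are ≥ 1, so s ≥ 2
      have hs2 : 2 ≤ s := by simp only [dlo] at *; omega
      rw [hp2 hs2]
      rw [show max 0 ((s : Int) - 1 - (b.length : Int)) = ((dlo b (s - 1) : Nat) : Int) by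
            simp only [dlo]; omega,
          show max 0 ((s : Int) - 2 - (b.length : Int)) = ((dlo b (s - 2) : Nat) : Int) by
            simp only [dlo]; omega]
      have hV1 : PySem.List.pyGetD (ddiag a b (s - 1))
          (((dlo b s + k : Nat) : Int) - ((dlo b (s - 1) : Nat) : Int)) 0
          = levE (a.take (dlo b s + k)) (b.take (s - (dlo b s + k) - 1)) := by
        rw [show ((dlo b s + k : Nat) : Int) - ((dlo b (s - 1) : Nat) : Int)
            = ((dlo b s + k - dlo b (s - 1) : Nat) : Int) by simp only [dlo]; omega]
        rw [PySem.List.pyGetD_natCast]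
        unfold ddiag
        rw [PySem.List.getD_map_range _ _ _ _ (by simp only [dlo] at *; omega)]
        unfold dcell
        rw [show dlo b (s - 1) + (dlo b s + k - dlo b (s - 1)) = dlo b s + k by
              simp only [dlo] at *; omega,
            show (s - 1) - (dlo b s + k) = s - (dlo b s + k) - 1 by omega]
      have hV2 : PySem.List.pyGetD (ddiag a b (s - 1))
          (((dlo b s + k : Nat) : Int) - 1 - ((dlo b (s - 1) : Nat) : Int)) 0
          = levE (a.take (dlo b s + k - 1)) (b.take (s - (dlo b s + k))) := by
        rw [show ((dlo b s + k : Nat) : Int) - 1 - ((dlo b (s - 1) : Nat) : Int)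
            = ((dlo b s + k - 1 - dlo b (s - 1) : Nat) : Int) by simp only [dlo] at *; omega]
        rw [PySem.List.pyGetD_natCast]
        unfold ddiag
        rw [PySem.List.getD_map_range _ _ _ _ (by simp only [dlo] at *; omega)]
        unfold dcell
        rw [show dlo b (s - 1) + (dlo b s + k - 1 - dlo b (s - 1)) = dlo b s + k - 1 by
              simp only [dlo] at *; omega,
            show (s - 1) - (dlo b s + k - 1) = s - (dlo b s + k) by
              simp only [dlo] at *; omega]
      have hV3 : PySem.List.pyGetD (ddiag a b (s - 2))
          (((dlo b s + k : Nat) : Int) - 1 - ((dlo b (s - 2) : Nat) : Int)) 0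
          = levE (a.take (dlo b s + k - 1)) (b.take (s - (dlo b s + k) - 1)) := by
        rw [show ((dlo b s + k : Nat) : Int) - 1 - ((dlo b (s - 2) : Nat) : Int)
            = ((dlo b s + k - 1 - dlo b (s - 2) : Nat) : Int) by simp only [dlo] at *; omega]
        rw [PySem.List.pyGetD_natCast]
        unfold ddiag
        rw [PySem.List.getD_map_range _ _ _ _ (by simp only [dlo] at *; omega)]
        unfold dcell
        rw [show dlo b (s - 2) + (dlo b s + k - 1 - dlo b (s - 2)) = dlo b s + k - 1 by
              simp only [dlo] at *; omega,
            show (s - 2) - (dlo b s + k - 1) = s - (dlo b s + k) - 1 by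
              simp only [dlo] at *; omega]
      have hia : dlo b s + k - 1 < a.length := by simp only [dlo] at *; omega
      have hjb : s - (dlo b s + k) - 1 < b.length := by simp only [dlo] at *; omega
      have hca : PySem.List.pyGetD a (((dlo b s + k : Nat) : Int) - 1) ' '
          = a[dlo b s + k - 1]'hia := by
        rw [show ((dlo b s + k : Nat) : Int) - 1 = ((dlo b s + k - 1 : Nat) : Int) by omega]
        rw [PySem.List.pyGetD_natCast]
        exact List.getD_eq_getElem a ' ' hia
      have hcb : PySem.List.pyGetD b ((s : Int) - ((dlo b s + k : Nat) : Int) - 1) ' '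
          = b[s - (dlo b s + k) - 1]'hjb := by
        rw [show (s : Int) - ((dlo b s + k : Nat) : Int) - 1
            = ((s - (dlo b s + k) - 1 : Nat) : Int) by simp only [dlo] at *; omega]
        rw [PySem.List.pyGetD_natCast]
        exact List.getD_eq_getElem b ' ' hjb
      rw [hV1, hV2, hV3, hca, hcb]
      have hta : a.take (dlo b s + k)
          = a.take (dlo b s + k - 1) ++ [a[dlo b s + k - 1]'hia] := by
        conv_lhs => rw [show dlo b s + k = (dlo b s + k - 1) + 1 by omega]
        rw [List.take_add_one, List.getElem?_eq_getElem hia]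
        simp
      have htb : b.take (s - (dlo b s + k))
          = b.take (s - (dlo b s + k) - 1) ++ [b[s - (dlo b s + k) - 1]'hjb] := by
        conv_lhs => rw [show s - (dlo b s + k) = (s - (dlo b s + k) - 1) + 1 by omega]
        rw [List.take_add_one, List.getElem?_eq_getElem hjb]
        simp
      have htarget : dcell a b s k
          = min (levE (a.take (dlo b s + k - 1)) (b.take (s - (dlo b s + k))) + 1)
              (min (levE (a.take (dlo b s + k)) (b.take (s - (dlo b s + k) - 1)) + 1)
                (levE (a.take (dlo b s + k - 1)) (b.take (s - (dlo b s + k) - 1))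
                  + (if a[dlo b s + k - 1]'hia = b[s - (dlo b s + k) - 1]'hjb
                     then 0 else 1))) := by
        unfold dcell
        conv_lhs => rw [hta, htb]
        rw [levE_snoc_snoc, ← hta, ← htb]
      rw [htarget, min_left_comm]

lemma innerFold_eq (a b : List Char) (s : Nat) (hs1 : 1 ≤ s) (hs : s ≤ a.length + b.length)
    (prev2 : List Int) (hp2 : 2 ≤ s → prev2 = ddiag a b (s - 2)) :
    ∀ k, k ≤ min s a.length + 1 - dlo b s →
      (PySem.List.pyRange ((dlo b s : Nat) : Int) ((dlo b s + k : Nat) : Int) 1).foldl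
        (pvCellStep a b prev2 (ddiag a b (s - 1)) (s : Int)
          (max 0 ((s : Int) - 1 - (b.length : Int))) (max 0 ((s : Int) - 2 - (b.length : Int)))) []
      = (List.range k).map (dcell a b s) := by
  intro k
  induction k with
  | zero =>
    intro _
    rw [show ((dlo b s + 0 : Nat) : Int) = ((dlo b s : Nat) : Int) by norm_num,
        PySem.List.pyRange_one_eq_nil le_rfl]
    rfl
  | succ k ih =>
    intro hk
    have hsplit : PySem.List.pyRange ((dlo b s : Nat) : Int) ((dlo b s + (k + 1) : Nat) : Int) 1
        = PySem.List.pyRange ((dlo b s : Nat) : Int) ((dlo b s + k : Nat) : Int) 1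
          ++ [((dlo b s + k : Nat) : Int)] := by
      rw [show ((dlo b s + (k + 1) : Nat) : Int) = ((dlo b s + k : Nat) : Int) + 1 by
        push_cast; ring]
      exact PySem.List.pyRange_one_succ_right (by omega)
    rw [hsplit, List.foldl_append, ih (by omega), List.foldl_cons, List.foldl_nil]
    rw [cellStep_eq a b s hs1 hs prev2 hp2 k (by omega)]

lemma diagStep_eq (a b : List Char) (s : Nat) (hs1 : 1 ≤ s) (hs : s ≤ a.length + b.length)
    (prev2 : List Int) (hp2 : 2 ≤ s → prev2 = ddiag a b (s - 2)) :
    pvDiagStep a b (a.length : Int) (b.length : Int) (prev2, ddiag a b (s - 1)) (s : Int)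
      = (ddiag a b (s - 1), ddiag a b s) := by
  unfold pvDiagStep
  dsimp only
  have hdle : dlo b s ≤ min s a.length := by unfold dlo; omega
  have hlo : max 0 ((s : Int) - (b.length : Int)) = ((dlo b s : Nat) : Int) := by
    unfold dlo; omega
  have hhi : min (s : Int) (a.length : Int) + 1
      = ((dlo b s + (min s a.length + 1 - dlo b s) : Nat) : Int) := by
    unfold dlo at *; omega
  rw [hlo, hhi]
  rw [innerFold_eq a b s hs1 hs prev2 hp2 (min s a.length + 1 - dlo b s) le_rfl]
  rfl

lemma ddiag_last (a b : List Char) : ddiag a b (a.length + b.length) = [levE a b] := by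
  unfold ddiag dlo
  rw [show a.length + b.length - b.length = a.length by omega,
      show min (a.length + b.length) a.length = a.length by omega,
      show a.length + 1 - a.length = 1 by omega, List.range_one]
  unfold dcell dlo
  rw [show a.length + b.length - b.length = a.length by omega]
  simp only [List.map_cons, List.map_nil, Nat.add_zero]
  rw [show a.length + b.length - a.length = b.length by omega,
      List.take_length, List.take_length]

lemma outerFold_eq (a b : List Char) :
    ∀ S : Nat, S ≤ a.length + b.length →
      (PySem.List.pyRange 1 ((S : Nat) + 1 : Int) 1).foldl
        (pvDiagStep a b (a.length : Int) (b.length : Int)) ([], [0])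
      = ((if S = 0 then [] else ddiag a b (S - 1)), ddiag a b S) := by
  intro S
  induction S with
  | zero =>
    intro _
    rw [show (((0 : Nat) : Int) + 1 : Int) = 1 by norm_num,
        PySem.List.pyRange_one_eq_nil le_rfl]
    simp [ddiag_zero]
  | succ S ih =>
    intro hS
    have hsplit : PySem.List.pyRange 1 (((S + 1 : Nat) : Int) + 1) 1
        = PySem.List.pyRange 1 ((S : Nat) + 1 : Int) 1 ++ [((S : Nat) : Int) + 1] := by
      rw [show (((S + 1 : Nat) : Int) + 1) = (((S : Nat) : Int) + 1) + 1 by push_cast; ring]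
      exact PySem.List.pyRange_one_succ_right (by omega)
    rw [hsplit, List.foldl_append, ih (by omega), List.foldl_cons, List.foldl_nil]
    have hcast : ((S : Nat) : Int) + 1 = ((S + 1 : Nat) : Int) := by push_cast; ring
    rcases Nat.eq_zero_or_pos S with rfl | hpos
    · rw [if_pos rfl, hcast]
      have h1 := diagStep_eq a b 1 le_rfl (by omega) [] (by omega)
      rw [show (0 : Nat) + 1 = 1 from rfl, if_neg (show ¬ (1 : Nat) = 0 by omega)]
      exact h1
    · rw [if_neg (by omega), hcast]
      have := diagStep_eq a b (S + 1) (by omega) (by omega) (ddiag a b (S - 1))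
        (fun _ => by rw [show S + 1 - 2 = S - 1 by omega])
      rw [show S + 1 - 1 = S from rfl] at this
      rw [this]
      rw [if_neg (by omega), show S + 1 - 1 = S from rfl]

lemma levAlt_eq (a b : List Char) : pvLevAlt a b = levE a b := by
  unfold pvLevAlt
  dsimp only
  have hcast : (a.length : Int) + (b.length : Int) + 1 = ((a.length + b.length : Nat) : Int) + 1 := by
    push_cast; ring
  rw [hcast, outerFold_eq a b (a.length + b.length) le_rfl]
  dsimp only
  rw [ddiag_last]
  rfl

-- ---- selection: shrinking threshold = fixed threshold ----

lemma sel_eq (name : String) (md : Int) :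
    ∀ (cs : List String) (best : Option String) (bound : Int), bound ≤ md →
      cs.foldl (pvSelStep name md) (best, bound + 1)
      = ((cs.foldl (pvSelStepB name) (best, bound)).1,
         (cs.foldl (pvSelStepB name) (best, bound)).2 + 1) := by
  intro cs
  induction cs with
  | nil => intro best bound _; rfl
  | cons c cs ih =>
    intro best bound hb
    rw [List.foldl_cons, List.foldl_cons]
    by_cases hc : c = name
    · rw [show pvSelStep name md (best, bound + 1) c = (best, bound + 1) by
        unfold pvSelStep; rw [if_pos hc]]
      rw [show pvSelStepB name (best, bound) c = (best, bound) by
        unfold pvSelStepB; exact if_pos (Or.inl hc)]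
      exact ih best bound hb
    · have habs : |(name.toList.length : Int) - (c.toList.length : Int)| ≤
          pvLevenshtein name c := by
        rw [lev_eq]; exact levE_abs_le _ _
      rw [abs_sub_comm] at habs
      by_cases hmd : md < |(c.toList.length : Int) - (name.toList.length : Int)|
      · rw [show pvSelStep name md (best, bound + 1) c = (best, bound + 1) by
          unfold pvSelStep; rw [if_neg hc, if_pos hmd]]
        rw [show pvSelStepB name (best, bound) c = (best, bound) by
          unfold pvSelStepB; exact if_pos (Or.inr (by dsimp only; omega))]
        exact ih best bound hb
      · by_cases hbb : bound < |(c.toList.length : Int) - (name.toList.length : Int)|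
        · rw [show pvSelStep name md (best, bound + 1) c = (best, bound + 1) by
            unfold pvSelStep; rw [if_neg hc, if_neg hmd]; dsimp only
            rw [if_neg (show ¬ pvLevenshtein name c < bound + 1 by omega)]]
          rw [show pvSelStepB name (best, bound) c = (best, bound) by
            unfold pvSelStepB; exact if_pos (Or.inr (by dsimp only; omega))]
          exact ih best bound hb
        · have hBne : ¬ (c = name ∨ bound <
              |(c.toList.length : Int) - (name.toList.length : Int)|) := by
            push Not; exact ⟨hc, by omega⟩
          have hd : pvLevAlt name.toList c.toList = pvLevenshtein name c := by
            rw [levAlt_eq, lev_eq]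
          by_cases hle : pvLevenshtein name c ≤ bound
          · rw [show pvSelStep name md (best, bound + 1) c
                = (some c, pvLevenshtein name c) by
              unfold pvSelStep; rw [if_neg hc, if_neg hmd]; dsimp only
              rw [if_pos (show pvLevenshtein name c < bound + 1 by omega)]]
            rw [show pvSelStepB name (best, bound) c
                = (some c, pvLevenshtein name c - 1) by
              unfold pvSelStepB; rw [if_neg hBne]; dsimp only
              rw [hd, if_pos hle]]
            have := ih (some c) (pvLevenshtein name c - 1) (by omega)
            rw [show pvLevenshtein name c - 1 + 1 = pvLevenshtein name c from by ring] at this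
            exact this
          · rw [show pvSelStep name md (best, bound + 1) c = (best, bound + 1) by
              unfold pvSelStep; rw [if_neg hc, if_neg hmd]; dsimp only
              rw [if_neg (show ¬ pvLevenshtein name c < bound + 1 by omega)]]
            rw [show pvSelStepB name (best, bound) c = (best, bound) by
              unfold pvSelStepB; rw [if_neg hBne]; dsimp only
              rw [hd, if_neg hle]]
            exact ih best bound hb

-- ===== VERDICT (by name: the statement is the Claim_ definition above) =====
theorem suggest_identifier_spec : Claim_equal_suggest_identifier := by
  intro name candidates md _
  unfold Spec_suggest_identifier suggest_identifier suggest_identifier_alt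
  split
  · rfl
  · rw [sel_eq name md candidates none md le_rfl]
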